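-- pv_equiv track=rewrite | github.com/rarishula/MonsterDQN | GameEnvironment.py | end_of_turn
-- ===== SOURCE A (Python) =====
-- def end_of_turn(player_monsters, ai_monsters):
--
--     # 体力が0以下の場合の交代処理
--     for side, monsters in [("player", player_monsters), ("ai", ai_monsters)]:
--         if monsters[0][1] <= 0:
--             for i, (_, hp) in enumerate(monsters):
--                 if hp > 0:
--                     monsters[0], monsters[i] = monsters[i], monsters[0]
--                     break
--
--
--     # 勝敗判定
--     player_all_fainted = all(hp <= 0 for _, hp in player_monsters)
--     ai_all_fainted = all(hp <= 0 for _, hp in ai_monsters)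
--     if player_all_fainted and ai_all_fainted:
--         return "draw"
--     elif player_all_fainted:
--         return "ai"
--     elif ai_all_fainted:
--         return "player"
--
--
--     return None  # ゲームが続行する場合
-- ===== SOURCE B (Python) =====
-- def end_of_turn(player_monsters, ai_monsters):
--     # Return-value only: a side has lost exactly when it has no monster with hp > 0.
--     # A's in-place swap is a permutation of the list, so it cannot change that fact;
--     # B therefore performs no swap/mutation at all and just tests liveness per side.
--     p_alive = any(hp > 0 for _, hp in player_monsters)
--     a_alive = any(hp > 0 for _, hp in ai_monsters)
--     return {(False, False): "draw",
--             (False, True): "ai",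
--             (True, False): "player",
--             (True, True): None}[(p_alive, a_alive)]
-- ===== Notes on version B (the rewrite author's own statement) =====
-- stated objective: simpler
-- what changed: B drops A's swap-to-front mutation entirely (the swap is a permutation, so it cannot affect who has lost) and decides the outcome from two any(hp>0) liveness tests via a lookup table; equivalence is about the return value only, B does not reproduce A's in-place mutation.
import Mathlib
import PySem

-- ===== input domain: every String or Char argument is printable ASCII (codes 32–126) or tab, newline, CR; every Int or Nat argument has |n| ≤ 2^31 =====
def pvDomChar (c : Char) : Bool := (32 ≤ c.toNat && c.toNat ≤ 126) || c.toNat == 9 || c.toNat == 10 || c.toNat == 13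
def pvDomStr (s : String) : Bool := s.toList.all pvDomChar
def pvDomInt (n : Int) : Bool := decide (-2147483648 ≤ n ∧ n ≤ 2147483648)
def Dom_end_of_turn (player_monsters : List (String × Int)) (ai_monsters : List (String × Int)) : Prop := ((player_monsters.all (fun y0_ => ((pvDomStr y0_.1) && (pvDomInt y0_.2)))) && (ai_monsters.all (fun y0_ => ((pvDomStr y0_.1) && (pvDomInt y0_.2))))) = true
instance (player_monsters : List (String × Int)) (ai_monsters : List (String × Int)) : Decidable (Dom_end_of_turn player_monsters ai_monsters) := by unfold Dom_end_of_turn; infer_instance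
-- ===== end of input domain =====

-- B drops A's in-place swap (a permutation, irrelevant to who lost) and decides the outcome
-- from two liveness tests via a lookup table; equivalence is about the RETURN value only
-- (A mutates its argument lists, B does not).

-- ===== PORT A =====

-- A's inner `for i, (_, hp) in enumerate(monsters): if hp > 0: ... break`:
-- first index (starting at i) whose hp is > 0.
def pvFindA (ms : List (String × Int)) (i : Nat) : Option Nat :=
  match ms with
  | [] => none
  | m :: rest => if 0 < m.2 then some i else pvFindA rest (i + 1)

-- A's outer per-side block: if the front is fainted, swap the first healthy monster to the front.
def pvSwapA (ms : List (String × Int)) : List (String × Int) :=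
  match ms with
  | [] => []
  | m0 :: rest =>
    if m0.2 ≤ 0 then
      match pvFindA (m0 :: rest) 0 with
      | some i =>
        match (m0 :: rest)[i]? with
        | some mi => (((m0 :: rest).set 0 mi).set i m0)
        | none => m0 :: rest
      | none => m0 :: rest
    else m0 :: rest

def end_of_turn (player_monsters : List (String × Int)) (ai_monsters : List (String × Int)) : Option String :=
  let p := pvSwapA player_monsters
  let a := pvSwapA ai_monsters
  let player_all_fainted := p.all (fun m => decide (m.2 ≤ 0))
  let ai_all_fainted := a.all (fun m => decide (m.2 ≤ 0))
  if player_all_fainted && ai_all_fainted then some "draw"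
  else if player_all_fainted then some "ai"
  else if ai_all_fainted then some "player"
  else none

-- ===== PORT B =====

-- B: two any(hp > 0) liveness tests, outcome via a four-entry lookup table (the Python dict).
def end_of_turn_alt (player_monsters : List (String × Int)) (ai_monsters : List (String × Int)) : Option String :=
  let p_alive := player_monsters.any (fun m => decide (0 < m.2))
  let a_alive := ai_monsters.any (fun m => decide (0 < m.2))
  match p_alive, a_alive with
  | false, false => some "draw"
  | false, true  => some "ai"
  | true,  false => some "player"
  | true,  true  => none

-- ===== PRECONDITION & SPEC =====
-- Pre_ excludes empty monster lists, on which A raises IndexError at monsters[0].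
def Pre_end_of_turn (player_monsters : List (String × Int)) (ai_monsters : List (String × Int)) : Prop :=
  player_monsters ≠ [] ∧ ai_monsters ≠ []
instance (player_monsters : List (String × Int)) (ai_monsters : List (String × Int)) : Decidable (Pre_end_of_turn player_monsters ai_monsters) := by unfold Pre_end_of_turn; infer_instance

def pvWitness_end_of_turn : (List (String × Int)) × (List (String × Int)) :=
  ([("slime", 0), ("dragon", 5)], [("golem", 3)])

def Spec_end_of_turn (player_monsters : List (String × Int)) (ai_monsters : List (String × Int)) (out : Option String) : Prop := out = end_of_turn_alt player_monsters ai_monsters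
instance (player_monsters : List (String × Int)) (ai_monsters : List (String × Int)) (out : Option String) : Decidable (Spec_end_of_turn player_monsters ai_monsters out) := by unfold Spec_end_of_turn; infer_instance

-- ===== CLAIM (what is proved, stated in full; the proofs are below) =====
def Claim_equal_end_of_turn : Prop := ∀ (player_monsters : List (String × Int)) (ai_monsters : List (String × Int)), Dom_end_of_turn player_monsters ai_monsters → Pre_end_of_turn player_monsters ai_monsters → Spec_end_of_turn player_monsters ai_monsters (end_of_turn player_monsters ai_monsters)

-- ===== LEMMAS AND PROOFS =====

-- A's hand-written find equals the library findIdx?.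
theorem pvFindA_eq (ms : List (String × Int)) (i : Nat) :
    pvFindA ms i = (List.findIdx? (fun m => decide (0 < m.2)) ms).map (· + i) := by
  induction ms generalizing i with
  | nil => simp [pvFindA]
  | cons m rest ih =>
    simp only [pvFindA, List.findIdx?_cons]
    by_cases h : (0 : Int) < m.2
    · simp [h]
    · simp only [h, decide_false]
      rw [ih]
      cases List.findIdx? (fun m => decide (0 < m.2)) rest <;> simp <;> omega

-- A's post-swap full-list fainted scan is exactly the negation of B's liveness test:
-- the swap is a permutation of the list, so "all fainted" is unchanged by it.
theorem allFainted_swap (ms : List (String × Int)) :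
    (pvSwapA ms).all (fun m => decide (m.2 ≤ 0)) = !(ms.any (fun m => decide (0 < m.2))) := by
  match ms with
  | [] => simp [pvSwapA]
  | m0 :: rest =>
    simp only [pvSwapA, pvFindA_eq]
    by_cases h0 : m0.2 ≤ 0
    · simp only [if_pos h0]
      rcases hf : List.findIdx? (fun m => decide (0 < m.2)) (m0 :: rest) with _ | i
      · -- no healthy monster: list unchanged, both sides "all fainted"
        have hall : ∀ x ∈ m0 :: rest, ¬ (0 < x.2) := by
          intro x hx hc
          have := List.findIdx?_eq_none_iff.mp hf x hx
          simp [hc] at this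
        have hallb : (m0 :: rest).all (fun m => decide (m.2 ≤ 0)) = true := by
          rw [List.all_eq_true]; intro x hx; have := hall x hx; simp; omega
        have hanyb : (m0 :: rest).any (fun m => decide (0 < m.2)) = false := by
          rw [List.any_eq_false]; intro x hx; simpa using hall x hx
        rw [hf]; simp [hallb, hanyb]
      · -- healthy monster at index i swapped to the front
        obtain ⟨hi, hp, -⟩ := List.findIdx?_eq_some_iff_getElem.mp hf
        have hpi : (0 : Int) < (m0 :: rest)[i].2 := by simpa using hp
        have hi0 : i ≠ 0 := by
          intro h'; subst h'; simp at hpi; omega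
        obtain ⟨j, rfl⟩ := Nat.exists_eq_succ_of_ne_zero hi0
        simp only [hf, Option.map_some, Nat.add_zero]
        rw [List.getElem?_eq_getElem hi]
        simp only [List.set_cons_zero, List.set_cons_succ]
        simp only [Nat.succ_eq_add_one, List.getElem_cons_succ] at hpi
        have hj : j < rest.length := by simpa using hi
        have hlt : ¬ ((rest[j]'hj).2 ≤ 0) := by omega
        have hmem : rest[j]'hj ∈ m0 :: rest := List.mem_cons_of_mem _ (List.getElem_mem hj)
        have hanyb : (m0 :: rest).any (fun m => decide (0 < m.2)) = true := by
          rw [List.any_eq_true]; exact ⟨_, hmem, by simpa using hpi⟩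
        simp [hlt, hanyb]
    · -- front already healthy: list unchanged, neither "all fainted" nor "no alive"
      simp only [if_neg h0]
      have h0' : (0 : Int) < m0.2 := by omega
      simp [h0', h0]

-- ===== VERDICT (by name: the statement is the Claim_ definition above) =====
theorem end_of_turn_spec : Claim_equal_end_of_turn := by
  intro p a _ _
  simp only [Spec_end_of_turn, end_of_turn, end_of_turn_alt, allFainted_swap]
  cases p.any (fun m => decide (0 < m.2)) <;> cases a.any (fun m => decide (0 < m.2)) <;> rfl
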